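-- pv_equiv track=rewrite | github.com/samuellin01/osworld-dag-scheduler | scripts/python/run_batch_osworld_baseline.py | find_next_trial_slots
-- ===== SOURCE A (Python) =====
-- def find_next_trial_slots(existing_trials: list[int], num_new_trials: int) -> list[int]:
--     """Find the next available trial slots, filling gaps first.
--
--     Args:
--         existing_trials: List of existing trial numbers (e.g., [1, 3, 5])
--         num_new_trials: Number of new trial slots needed
--
--     Returns:
--         List of trial numbers to use (e.g., [2, 4] if 2 new trials needed)
--
--     Examples:
--         >>> find_next_trial_slots([1, 3], 2)
--         [2, 4]
--         >>> find_next_trial_slots([2], 1)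
--         [1]
--         >>> find_next_trial_slots([], 3)
--         [1, 2, 3]
--     """
--     if not existing_trials:
--         return list(range(1, num_new_trials + 1))
--
--     slots = []
--     candidate = 1
--     existing_set = set(existing_trials)
--
--     while len(slots) < num_new_trials:
--         if candidate not in existing_set:
--             slots.append(candidate)
--         candidate += 1
--
--     return slots
-- ===== SOURCE B (Python) =====
-- def find_next_trial_slots(existing_trials: list[int], num_new_trials: int) -> list[int]:
--     """Gap-walk over the sorted distinct positive existing trial numbers."""
--     present = sorted(v for v in set(existing_trials) if v > 0)
--     slots = []
--     expected = 1
--     for v in present: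
--         while expected < v and len(slots) < num_new_trials:
--             slots.append(expected)
--             expected += 1
--         if v >= expected:
--             expected = v + 1
--     while len(slots) < num_new_trials:
--         slots.append(expected)
--         expected += 1
--     return slots
-- ===== Notes on version B (the rewrite author's own statement) =====
-- stated objective: alternative
-- what changed: Replaces A's unbounded candidate-by-candidate scan with membership tests against the set by a gap walk over the sorted distinct positive existing values with an 'expected' counter, then a tail fill.
import Mathlib
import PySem

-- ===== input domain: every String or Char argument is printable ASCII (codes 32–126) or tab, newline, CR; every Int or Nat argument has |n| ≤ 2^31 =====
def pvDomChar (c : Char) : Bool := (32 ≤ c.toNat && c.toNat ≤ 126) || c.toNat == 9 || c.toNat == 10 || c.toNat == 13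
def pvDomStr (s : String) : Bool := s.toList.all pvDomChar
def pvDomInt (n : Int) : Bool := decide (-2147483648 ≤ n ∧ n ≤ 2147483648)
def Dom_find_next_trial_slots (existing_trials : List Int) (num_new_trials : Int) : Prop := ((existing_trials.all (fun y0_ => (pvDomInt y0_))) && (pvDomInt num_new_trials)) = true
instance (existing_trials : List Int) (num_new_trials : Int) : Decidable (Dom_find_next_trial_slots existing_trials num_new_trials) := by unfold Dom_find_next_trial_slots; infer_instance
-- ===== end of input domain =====

-- B replaces A's unbounded candidate-by-candidate scan (membership test per candidate) by a gap
-- walk over the sorted distinct positive existing values, plus a tail fill (objective: alternative).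

-- ===== PORT A =====
-- A's `while len(slots) < num_new_trials` loop; fuel = num_new_trials.toNat + |existing_set|
-- iterations always suffice: each iteration either collects a candidate or passes a set member.
def pvALoop (s : List Int) (n : Int) : Nat → Int → List Int → List Int
  | 0, _, slots => slots
  | f + 1, candidate, slots =>
    if (slots.length : Int) < n then
      if s.contains candidate then pvALoop s n f (candidate + 1) slots
      else pvALoop s n f (candidate + 1) (slots ++ [candidate])
    else slots

def find_next_trial_slots (existing_trials : List Int) (num_new_trials : Int) : List Int :=
  if existing_trials = [] then PySem.List.pyRange 1 (num_new_trials + 1) 1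
  else
    let existing_set := PySem.Set.ofList existing_trials
    pvALoop existing_set num_new_trials (num_new_trials.toNat + existing_set.length) 1 []

-- ===== PORT B =====
-- inner `while expected < v and len(slots) < num_new_trials` loop
def pvGap (n v : Int) (expected : Int) (slots : List Int) : Int × List Int :=
  if expected < v ∧ (slots.length : Int) < n then pvGap n v (expected + 1) (slots ++ [expected])
  else (expected, slots)
termination_by (v - expected).toNat
decreasing_by omega

-- one iteration of the `for v in present` loop: run the inner while, then update `expected`
def pvStep (n : Int) (st : Int × List Int) (v : Int) : Int × List Int :=
  let es := pvGap n v st.1 st.2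
  (if v ≥ es.1 then v + 1 else es.1, es.2)

-- final `while len(slots) < num_new_trials` loop
def pvTail (n : Int) (expected : Int) (slots : List Int) : List Int :=
  if (slots.length : Int) < n then pvTail n (expected + 1) (slots ++ [expected])
  else slots
termination_by (n - slots.length).toNat
decreasing_by simp; omega

def find_next_trial_slots_alt (existing_trials : List Int) (num_new_trials : Int) : List Int :=
  let present := PySem.List.sorted ((PySem.Set.ofList existing_trials).filter (fun v => decide (0 < v))) (fun x => x) false
  let st := present.foldl (pvStep num_new_trials) (1, [])
  pvTail num_new_trials st.1 st.2

-- ===== PRECONDITION & SPEC =====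
def Spec_find_next_trial_slots (existing_trials : List Int) (num_new_trials : Int) (out : List Int) : Prop := out = find_next_trial_slots_alt existing_trials num_new_trials
instance (existing_trials : List Int) (num_new_trials : Int) (out : List Int) : Decidable (Spec_find_next_trial_slots existing_trials num_new_trials out) := by unfold Spec_find_next_trial_slots; infer_instance

-- ===== CLAIM (what is proved, stated in full; the proofs are below) =====
def Claim_equal_find_next_trial_slots : Prop := ∀ (existing_trials : List Int) (num_new_trials : Int), Dom_find_next_trial_slots existing_trials num_new_trials → Spec_find_next_trial_slots existing_trials num_new_trials (find_next_trial_slots existing_trials num_new_trials)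

-- ===== LEMMAS AND PROOFS =====

-- "the first k candidates ≥ cand missing from s", fuel-bounded: the shape of A's loop result
def pvFM (s : List Int) : Nat → Int → Nat → List Int
  | 0, _, _ => []
  | _ + 1, _, 0 => []
  | f + 1, cand, k + 1 =>
    if s.contains cand then pvFM s f (cand + 1) (k + 1)
    else cand :: pvFM s f (cand + 1) k

-- the same value computed structurally on the sorted distinct list (B's shape)
def pvG : List Int → Int → Nat → List Int
  | [], cand, k => (List.range k).map (fun i : Nat => cand + (i : Int))
  | v :: rest, cand, k =>
    if h : k = 0 then []
    else if cand < v then cand :: pvG (v :: rest) (cand + 1) (k - 1)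
    else pvG rest (cand + 1) k
termination_by L _ k => (k, L.length)
decreasing_by
  · exact Prod.Lex.left _ _ (by omega)
  · exact Prod.Lex.right _ (by simp)

lemma pvG_zero (L : List Int) (cand : Int) : pvG L cand 0 = [] := by
  cases L <;> simp [pvG]

lemma cons_map_range (e : Int) (j : Nat) :
    e :: (List.range j).map (fun i : Nat => (e + 1) + (i : Int)) = (List.range (j + 1)).map (fun i : Nat => e + (i : Int)) := by
  rw [List.range_succ_eq_map, List.map_cons, List.map_map]
  refine congrArg₂ List.cons (by simp) (List.map_congr_left ?_)
  intro i _
  simp only [Function.comp_apply, Nat.succ_eq_add_one]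
  push_cast
  ring

lemma pvALoop_eq (s : List Int) (n : Int) :
    ∀ (fuel : Nat) (cand : Int) (slots : List Int),
      pvALoop s n fuel cand slots = slots ++ pvFM s fuel cand (n - slots.length).toNat := by
  intro fuel
  induction fuel with
  | zero => intro cand slots; simp [pvALoop, pvFM]
  | succ f ih =>
    intro cand slots
    by_cases hlt : (slots.length : Int) < n
    · have hk : (n - (slots.length : Int)).toNat = ((n - ((slots.length : Int) + 1)).toNat) + 1 := by omega
      by_cases hc : s.contains cand = true
      · rw [pvALoop, if_pos hlt, if_pos hc, ih, hk, pvFM, if_pos hc]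
      · have h2 : (n - (((slots ++ [cand]).length : Nat) : Int)).toNat = (n - ((slots.length : Int) + 1)).toNat := by
          simp
        rw [pvALoop, if_pos hlt, if_neg hc, ih, h2, hk, pvFM, if_neg hc]
        simp [List.append_assoc]
    · have hk : (n - (slots.length : Int)).toNat = 0 := by omega
      rw [pvALoop, if_neg hlt, hk]
      cases f <;> simp [pvFM]

lemma pvFM_congr (s t : List Int) :
    ∀ (fuel : Nat) (cand : Int) (k : Nat),
      (∀ x : Int, cand ≤ x → (x ∈ s ↔ x ∈ t)) →
      pvFM s fuel cand k = pvFM t fuel cand k := by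
  intro fuel
  induction fuel with
  | zero => intro _ _ _; simp [pvFM]
  | succ f ih =>
    intro cand k h
    cases k with
    | zero => simp [pvFM]
    | succ k =>
      have hmem : s.contains cand = t.contains cand := by
        simp only [List.contains_eq_mem, decide_eq_decide]
        exact h cand le_rfl
      have h' : ∀ x : Int, cand + 1 ≤ x → (x ∈ s ↔ x ∈ t) := fun x hx => h x (by omega)
      rw [pvFM, pvFM, hmem]
      by_cases hc : t.contains cand = true
      · rw [if_pos hc, if_pos hc, ih _ _ h']
      · rw [if_neg hc, if_neg hc, ih _ _ h']

lemma pvFM_eq_pvG :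
    ∀ (fuel : Nat) (L : List Int) (cand : Int) (k : Nat),
      L.Pairwise (· < ·) → (∀ v ∈ L, cand ≤ v) → k + L.length ≤ fuel →
      pvFM L fuel cand k = pvG L cand k := by
  intro fuel
  induction fuel with
  | zero =>
    intro L cand k _ _ hf
    have hk : k = 0 := by omega
    have hL : L = [] := List.eq_nil_of_length_eq_zero (by omega)
    subst hk; subst hL
    simp [pvFM, pvG]
  | succ f ih =>
    intro L cand k hp hge hf
    cases k with
    | zero => rw [pvG_zero]; rfl
    | succ k =>
      cases L with
      | nil =>
        rw [pvFM, if_neg (by simp)]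
        rw [ih [] (cand + 1) k (by simp) (by simp) (by simp only [List.length_nil] at hf ⊢; omega)]
        simp only [pvG]
        exact cons_map_range cand k
      | cons v rest =>
        have hcv : cand ≤ v := hge v (by simp)
        have hp' : rest.Pairwise (· < ·) := (List.pairwise_cons.mp hp).2
        have hvr : ∀ u ∈ rest, v < u := (List.pairwise_cons.mp hp).1
        simp only [List.length_cons] at hf
        by_cases he : cand = v
        · subst he
          have hc : (cand :: rest).contains cand = true := by simp
          rw [pvFM, if_pos hc]
          have hcong : pvFM (cand :: rest) f (cand + 1) (k + 1) = pvFM rest f (cand + 1) (k + 1) := by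
            refine pvFM_congr _ _ f (cand + 1) (k + 1) ?_
            intro x hx
            simp only [List.mem_cons]
            exact ⟨fun h => h.resolve_left (by omega), Or.inr⟩
          rw [hcong, ih rest (cand + 1) (k + 1) hp' (fun u hu => by have := hvr u hu; omega) (by omega)]
          conv_rhs => rw [pvG]
          rw [dif_neg (Nat.succ_ne_zero k), if_neg (lt_irrefl cand)]
        · have hlt2 : cand < v := lt_of_le_of_ne hcv he
          have hc : ¬ ((v :: rest).contains cand = true) := by
            simp only [List.contains_eq_mem, decide_eq_true_eq, List.mem_cons]
            rintro (rfl | hm)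
            · omega
            · exact absurd (hvr _ hm) (by omega)
          rw [pvFM, if_neg hc]
          rw [ih (v :: rest) (cand + 1) k hp
              (fun u hu => by
                rcases List.mem_cons.mp hu with rfl | h
                · omega
                · have := hvr u h; omega)
              (by simp only [List.length_cons]; omega)]
          conv_rhs => rw [pvG]
          rw [dif_neg (Nat.succ_ne_zero k), if_pos hlt2]
          simp

lemma pvTail_eq (n : Int) :
    ∀ (j : Nat) (expected : Int) (slots : List Int), (n - slots.length).toNat = j →
      pvTail n expected slots = slots ++ (List.range j).map (fun i : Nat => expected + (i : Int)) := by
  intro j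
  induction j with
  | zero =>
    intro e slots hj
    rw [pvTail, if_neg (by omega)]
    simp
  | succ j ih =>
    intro e slots hj
    rw [pvTail, if_pos (by omega)]
    rw [ih (e + 1) (slots ++ [e]) (by simp; omega)]
    rw [List.append_assoc]
    simp only [List.singleton_append, cons_map_range]

-- B's whole computation from a mid-state: fold the remaining present values, then the tail fill
def pvBRun (n : Int) (L : List Int) (e : Int) (s : List Int) : List Int :=
  pvTail n (L.foldl (pvStep n) (e, s)).1 (L.foldl (pvStep n) (e, s)).2

lemma pvBRun_cons (n v : Int) (rest : List Int)
    (hvr : ∀ u ∈ rest, v < u)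
    (hrest : ∀ (c : Int) (s : List Int), (∀ u ∈ rest, c ≤ u) →
      pvBRun n rest c s = s ++ pvG rest c (n - s.length).toNat) :
    ∀ (j : Nat) (cand : Int) (slots : List Int), cand ≤ v → (v - cand).toNat ≤ j →
      pvBRun n (v :: rest) cand slots = slots ++ pvG (v :: rest) cand (n - slots.length).toNat := by
  have key : ∀ slots : List Int,
      pvBRun n (v :: rest) v slots = slots ++ pvG (v :: rest) v (n - slots.length).toNat := by
    intro slots
    have hg : pvGap n v v slots = (v, slots) := by
      rw [pvGap, if_neg (fun h => lt_irrefl v h.1)]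
    have hstep : pvStep n (v, slots) v = (v + 1, slots) := by
      simp [pvStep, hg]
    have h1 : pvBRun n (v :: rest) v slots = pvBRun n rest (v + 1) slots := by
      simp only [pvBRun, List.foldl_cons, hstep]
    rw [h1, hrest (v + 1) slots (fun u hu => by have := hvr u hu; omega)]
    congr 1
    by_cases hk : (n - (slots.length : Int)).toNat = 0
    · rw [hk, pvG_zero, pvG_zero]
    · conv_rhs => rw [pvG]
      rw [dif_neg hk, if_neg (lt_irrefl v)]
  intro j
  induction j with
  | zero =>
    intro cand slots hle hj
    have : cand = v := by omega
    subst this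
    exact key slots
  | succ j ihj =>
    intro cand slots hle hj
    by_cases he : cand = v
    · subst he; exact key slots
    · have hlt2 : cand < v := lt_of_le_of_ne hle he
      by_cases hlen : (slots.length : Int) < n
      · have hgap : pvGap n v cand slots = pvGap n v (cand + 1) (slots ++ [cand]) := by
          rw [pvGap, if_pos ⟨hlt2, hlen⟩]
        have h1 : pvBRun n (v :: rest) cand slots = pvBRun n (v :: rest) (cand + 1) (slots ++ [cand]) := by
          simp only [pvBRun, List.foldl_cons, pvStep, hgap]
        rw [h1, ihj (cand + 1) (slots ++ [cand]) (by omega) (by omega)]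
        have h2 : (n - (((slots ++ [cand]).length : Nat) : Int)).toNat = (n - ((slots.length : Int) + 1)).toNat := by
          simp
        have hk : (n - (slots.length : Int)).toNat = (n - ((slots.length : Int) + 1)).toNat + 1 := by omega
        rw [h2]
        conv_rhs => rw [hk, pvG]
        rw [dif_neg (Nat.succ_ne_zero _), if_pos hlt2]
        simp [List.append_assoc]
      · have hgap : pvGap n v cand slots = (cand, slots) := by
          rw [pvGap, if_neg (fun h => hlen h.2)]
        have hstep : pvStep n (cand, slots) v = (v + 1, slots) := by
          simp only [pvStep, hgap]
          simp [le_of_lt hlt2]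
        have h1 : pvBRun n (v :: rest) cand slots = pvBRun n rest (v + 1) slots := by
          simp only [pvBRun, List.foldl_cons, hstep]
        rw [h1, hrest (v + 1) slots (fun u hu => by have := hvr u hu; omega)]
        have hk : (n - (slots.length : Int)).toNat = 0 := by omega
        rw [hk, pvG_zero, pvG_zero]

lemma pvBRun_eq (n : Int) :
    ∀ (L : List Int), L.Pairwise (· < ·) → ∀ (cand : Int) (slots : List Int),
      (∀ v ∈ L, cand ≤ v) → pvBRun n L cand slots = slots ++ pvG L cand (n - slots.length).toNat := by
  intro L
  induction L with
  | nil =>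
    intro _ cand slots _
    show pvTail n cand slots = _
    rw [pvTail_eq n (n - (slots.length : Int)).toNat cand slots rfl]
    simp only [pvG]
  | cons v rest ih =>
    intro hp cand slots hge
    exact pvBRun_cons n v rest (List.pairwise_cons.mp hp).1
      (fun c s hc => ih (List.pairwise_cons.mp hp).2 c s hc)
      ((v - cand).toNat) cand slots (hge v (by simp)) le_rfl

-- ===== VERDICT (by name: the statement is the Claim_ definition above) =====
theorem find_next_trial_slots_spec : Claim_equal_find_next_trial_slots := by
  intro xs n _
  show find_next_trial_slots xs n = find_next_trial_slots_alt xs n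
  set L := PySem.List.sorted ((PySem.Set.ofList xs).filter (fun v => decide (0 < v))) (fun x => x) false with hL
  have hperm := PySem.List.sorted_perm ((PySem.Set.ofList xs).filter (fun v => decide (0 < v))) (fun x => x) false
  have hpl : L.Pairwise (· < ·) := by
    have h1 : L.Pairwise (fun a b => a ≤ b) := PySem.List.sorted_pairwise _ _
    have hnd : L.Nodup := hperm.nodup_iff.mpr ((PySem.Set.nodup_ofList xs).filter _)
    exact (h1.and hnd).imp (fun h => lt_of_le_of_ne h.1 h.2)
  have hge1 : ∀ v ∈ L, (1 : Int) ≤ v := by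
    intro v hv
    rw [hL, PySem.List.mem_sorted, List.mem_filter] at hv
    have := hv.2
    simp at this
    omega
  have hmemiff : ∀ x : Int, 1 ≤ x → (x ∈ PySem.Set.ofList xs ↔ x ∈ L) := by
    intro x hx
    rw [hL, PySem.List.mem_sorted, List.mem_filter]
    simp [show (0 : Int) < x from by omega]
  have hBr : find_next_trial_slots_alt xs n = pvBRun n L 1 [] := rfl
  rw [hBr, pvBRun_eq n L hpl 1 [] hge1]
  by_cases hnil : xs = []
  · subst hnil
    have hLnil : L = [] := by rw [hL]; rfl
    rw [find_next_trial_slots, if_pos rfl, hLnil]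
    simp only [pvG, List.nil_append, List.length_nil, Nat.cast_zero, sub_zero]
    rw [PySem.List.pyRange_one, show ((n + 1 - 1 : Int)) = n from by ring]
  · have hA : find_next_trial_slots xs n
        = pvALoop (PySem.Set.ofList xs) n (n.toNat + (PySem.Set.ofList xs).length) 1 [] := by
      rw [find_next_trial_slots, if_neg hnil]
    have hfuel : n.toNat + L.length ≤ n.toNat + (PySem.Set.ofList xs).length := by
      have h1 : L.length = ((PySem.Set.ofList xs).filter (fun v => decide (0 < v))).length := by
        rw [hL, PySem.List.length_sorted]
      have h2 := List.length_filter_le (fun v => decide (0 < v)) (PySem.Set.ofList xs)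
      omega
    rw [hA, pvALoop_eq]
    simp only [List.nil_append, List.length_nil, Nat.cast_zero, sub_zero]
    rw [pvFM_congr (PySem.Set.ofList xs) L _ 1 _ hmemiff]
    rw [pvFM_eq_pvG _ L 1 _ hpl hge1 hfuel]
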